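-- pv_equiv track=rewrite | github.com/synchronousbuilddigital/BoxFox_price_analyses- | scripts/fetch_pricing.py | fix_formula
-- ===== SOURCE A (Python) =====
-- def ifs_to_nested_if(ifs_args_str):
--     """
--     Convert IFS(c1,v1,c2,v2,...) arguments string to nested IF(c1,v1,IF(c2,v2,...,0))
--     ifs_args_str is everything inside IFS(...) — we parse pairs carefully.
--     """
--     # Split by comma but respect nested parentheses
--     parts = []
--     depth = 0
--     current = []
--     for ch in ifs_args_str:
--         if ch == ',' and depth == 0:
--             parts.append(''.join(current).strip())
--             current = []
--         else:
--             if ch == '(':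
--                 depth += 1
--             elif ch == ')':
--                 depth -= 1
--             current.append(ch)
--     if current:
--         parts.append(''.join(current).strip())
--
--     # Build nested IF from pairs
--     if len(parts) < 2:
--         return ifs_args_str
--
--     pairs = [(parts[i], parts[i+1]) for i in range(0, len(parts)-1, 2)]
--     result = '0'
--     for cond, val in reversed(pairs):
--         result = f'IF({cond},{val},{result})'
--     return result
--
-- def fix_formula(f):
--     """Convert Google Sheets formula to Excel-compatible formula."""
--     if not isinstance(f, str) or not f.startswith('='):
--         return f
--
--     # Drop Google Sheets-only functions entirely
--     if 'SPLIT(' in f or 'QUERY(' in f or 'UNIQUE(' in f or 'SORT(' in f: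
--         return ''
--
--     # IFNA -> IFERROR with fallback ""
--     f = f.replace('IFNA(', 'IFERROR(')
--
--     # Convert IFS(...) to nested IF(...)
--     # Find all IFS( occurrences and replace
--     import re
--
--     def replace_ifs(match):
--         inner = match.group(1)
--         return ifs_to_nested_if(inner)
--
--     # Match IFS( ... ) — handle nested parens
--     result = []
--     i = 0
--     while i < len(f):
--         if f[i:i+4] == 'IFS(':
--             # Find matching closing paren
--             depth = 1
--             j = i + 4
--             while j < len(f) and depth > 0:
--                 if f[j] == '(':
--                     depth += 1
--                 elif f[j] == ')':
--                     depth -= 1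
--                 j += 1
--             inner = f[i+4:j-1]
--             result.append(ifs_to_nested_if(inner))
--             i = j
--         else:
--             result.append(f[i])
--             i += 1
--
--     return ''.join(result)
-- ===== SOURCE B (Python) =====
-- def _nested_if(s):
--     # split at top-level commas by tracking slice boundaries, not by accumulating chars
--     parts, depth, start = [], 0, 0
--     for i, ch in enumerate(s):
--         if ch == ',' and depth == 0:
--             parts.append(s[start:i].strip())
--             start = i + 1
--         elif ch == '(':
--             depth += 1
--         elif ch == ')':
--             depth -= 1
--     if start < len(s):
--         parts.append(s[start:].strip())
--     if len(parts) < 2: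
--         return s
--     # build the nested IF front-to-back: open all IFs, then '0', then close them all
--     pieces = [f'IF({parts[k]},{parts[k + 1]},' for k in range(0, len(parts) - 1, 2)]
--     return ''.join(pieces) + '0' + ')' * len(pieces)
--
--
-- def fix_formula(f):
--     """Convert Google Sheets formula to Excel-compatible formula."""
--     if not isinstance(f, str) or not f.startswith('='):
--         return f
--     if 'SPLIT(' in f or 'QUERY(' in f or 'UNIQUE(' in f or 'SORT(' in f:
--         return ''
--     f = f.replace('IFNA(', 'IFERROR(')
--     out = []
--     rest = f
--     while True:
--         k = rest.find('IFS(')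
--         if k == -1:
--             out.append(rest)
--             break
--         out.append(rest[:k])
--         j = k + 4
--         depth = 1
--         while j < len(rest) and depth != 0:
--             depth += (rest[j] == '(') - (rest[j] == ')')
--             j += 1
--         out.append(_nested_if(rest[k + 4:j - 1]))
--         rest = rest[j:]
--     return ''.join(out)
-- ===== Notes on version B (the rewrite author's own statement) =====
-- stated objective: alternative
-- what changed: The scanner jumps between IFS occurrences with str.find and copies untouched spans as slices instead of testing and copying character by character, the argument splitter records slice boundaries instead of accumulating a current-chars buffer, and the nested IF is built front-to-back by joining the opening IF prefixes and appending the default value and a run of closing parentheses, instead of folding over the reversed pair list.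
import Mathlib
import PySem

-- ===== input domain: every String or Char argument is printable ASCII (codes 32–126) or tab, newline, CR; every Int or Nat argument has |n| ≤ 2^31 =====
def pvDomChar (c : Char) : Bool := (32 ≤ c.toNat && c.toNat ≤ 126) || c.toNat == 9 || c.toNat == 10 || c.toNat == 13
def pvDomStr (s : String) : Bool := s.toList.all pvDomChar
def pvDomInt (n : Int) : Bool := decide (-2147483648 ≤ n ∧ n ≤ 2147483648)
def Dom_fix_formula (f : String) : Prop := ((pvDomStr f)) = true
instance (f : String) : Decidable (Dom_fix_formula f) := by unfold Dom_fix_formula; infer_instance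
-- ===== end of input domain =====

-- B rewrites the same conversion with a find-and-slice scanner, a slice-boundary splitter and a
-- front-to-back nested-IF builder (objective: alternative; same results, no speed claim).

-- ===== PORT A =====
-- one step of A's comma-splitting loop: state (parts, depth, current)
def pvStepA (st : List (List Char) × Int × List Char) (ch : Char) :
    List (List Char) × Int × List Char :=
  if ch = ',' ∧ st.2.1 = 0 then (st.1 ++ [PySem.Chars.strip st.2.2], st.2.1, ([] : List Char))
  else
    let d := if ch = '(' then st.2.1 + 1 else if ch = ')' then st.2.1 - 1 else st.2.1
    (st.1, d, st.2.2 ++ [ch])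

-- ifs_to_nested_if from Source A
def pvNestedIfA (s : List Char) : List Char :=
  let st := s.foldl pvStepA ([], 0, [])
  let parts := if st.2.2 ≠ [] then st.1 ++ [PySem.Chars.strip st.2.2] else st.1
  if parts.length < 2 then s
  else
    let pairs := (PySem.List.pyRange 0 ((parts.length : Int) - 1) 2).map
      (fun i => (PySem.List.pyGetD parts i [], PySem.List.pyGetD parts (i + 1) []))
    pairs.reverse.foldl
      (fun r p => "IF(".toList ++ p.1 ++ [','] ++ p.2 ++ [','] ++ r ++ [')']) ['0']

-- A's inner while: advance j counting paren depth until it closes or the string ends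
-- (fuel = characters left to scan makes the recursion structural; the wrapper supplies it)
def pvFindCloseAAux (f : List Char) : Nat → Nat → Int → Nat
  | 0, j, _ => j
  | fuel + 1, j, depth =>
    if h : j < f.length ∧ 0 < depth then
      pvFindCloseAAux f fuel (j + 1)
        (if f[j]'h.1 = '(' then depth + 1 else if f[j]'h.1 = ')' then depth - 1 else depth)
    else j

def pvFindCloseA (f : List Char) (j : Nat) (depth : Int) : Nat :=
  pvFindCloseAAux f (f.length - j) j depth

-- A's outer while over index i, collecting the result pieces (same fuel pattern)
def pvScanAAux (f : List Char) : Nat → Nat → List (List Char)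
  | 0, _ => []
  | fuel + 1, i =>
    if h : i < f.length then
      if PySem.List.slice f (some (i : Int)) (some ((i : Int) + 4)) = "IFS(".toList then
        pvNestedIfA (PySem.List.slice f (some ((i : Int) + 4))
            (some (((pvFindCloseA f (i + 4) 1 : Nat) : Int) - 1))) ::
          pvScanAAux f fuel (pvFindCloseA f (i + 4) 1)
      else [f[i]] :: pvScanAAux f fuel (i + 1)
    else []

def pvScanA (f : List Char) (i : Nat) : List (List Char) := pvScanAAux f (f.length - i) i

def fix_formula (f : String) : String :=
  if !(PySem.Str.startswith f "=") then f
  else if PySem.Str.isIn "SPLIT(" f || PySem.Str.isIn "QUERY(" f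
      || PySem.Str.isIn "UNIQUE(" f || PySem.Str.isIn "SORT(" f then ""
  else
    String.mk (PySem.Chars.join []
      (pvScanA (PySem.Chars.replace f.toList "IFNA(".toList "IFERROR(".toList) 0))

-- ===== PORT B =====
-- one step of B's splitter: state (parts, depth, start); slices s instead of buffering chars
def pvStepB (s : List Char) (st : List (List Char) × Int × Int) (p : Int × Char) :
    List (List Char) × Int × Int :=
  if p.2 = ',' ∧ st.2.1 = 0 then
    (st.1 ++ [PySem.Chars.strip (PySem.List.slice s (some st.2.2) (some p.1))], st.2.1, p.1 + 1)
  else if p.2 = '(' then (st.1, st.2.1 + 1, st.2.2)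
  else if p.2 = ')' then (st.1, st.2.1 - 1, st.2.2)
  else st

-- _nested_if from Source B
def pvNestedIfB (s : List Char) : List Char :=
  let st := (PySem.List.enumerate s 0).foldl (pvStepB s) (([] : List (List Char)), (0 : Int), (0 : Int))
  let parts :=
    if st.2.2 < (s.length : Int) then
      st.1 ++ [PySem.Chars.strip (PySem.List.slice s (some st.2.2) none)]
    else st.1
  if parts.length < 2 then s
  else
    let pieces := (PySem.List.pyRange 0 ((parts.length : Int) - 1) 2).map
      (fun k => "IF(".toList ++ PySem.List.pyGetD parts k [] ++ [','] ++
        PySem.List.pyGetD parts (k + 1) [] ++ [','])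
    pieces.flatten ++ ['0'] ++ List.replicate pieces.length ')'

-- B's paren matcher (arithmetic depth update, loop while depth ≠ 0; fuel + wrapper)
def pvCloseBAux (f : List Char) : Nat → Nat → Int → Nat
  | 0, j, _ => j
  | fuel + 1, j, depth =>
    if h : j < f.length ∧ depth ≠ 0 then
      pvCloseBAux f fuel (j + 1)
        (depth + (if f[j]'h.1 = '(' then 1 else 0) - (if f[j]'h.1 = ')' then 1 else 0))
    else j

def pvCloseB (f : List Char) (j : Nat) (depth : Int) : Nat :=
  pvCloseBAux f (f.length - j) j depth

-- B's scanner: find the next 'IFS(', copy the untouched span as a slice, convert, drop, repeat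
def pvScanBAux : Nat → List Char → List Char
  | 0, r => r
  | fuel + 1, r =>
    let k := PySem.Chars.find r "IFS(".toList
    if k = -1 then r
    else
      let kn := k.toNat
      let j := pvCloseB r (kn + 4) 1
      r.take kn ++
        pvNestedIfB (PySem.List.slice r (some ((kn : Int) + 4)) (some ((j : Int) - 1))) ++
        pvScanBAux fuel (r.drop j)

def pvScanB (r : List Char) : List Char := pvScanBAux r.length r

def fix_formula_alt (f : String) : String :=
  if !(PySem.Str.startswith f "=") then f
  else if PySem.Str.isIn "SPLIT(" f || PySem.Str.isIn "QUERY(" f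
      || PySem.Str.isIn "UNIQUE(" f || PySem.Str.isIn "SORT(" f then ""
  else
    String.mk (pvScanB (PySem.Chars.replace f.toList "IFNA(".toList "IFERROR(".toList))

-- ===== PRECONDITION & SPEC =====
def Spec_fix_formula (f : String) (out : String) : Prop := out = fix_formula_alt f
instance (f : String) (out : String) : Decidable (Spec_fix_formula f out) := by
  unfold Spec_fix_formula; infer_instance

-- ===== CLAIM (what is proved, stated in full; the proofs are below) =====
def Claim_equal_fix_formula : Prop := ∀ (f : String), Dom_fix_formula f → Spec_fix_formula f (fix_formula f)

-- ===== LEMMAS AND PROOFS =====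

-- the two splitter folds agree: A's current buffer is always s[start:pos]
theorem pvSplit_rel (s : List Char) :
    ∀ (t : List Char) (k start : Nat) (P : List (List Char)) (d : Int),
      t = s.drop k → start ≤ k → k ≤ s.length →
      (t.foldl pvStepA (P, d, (s.take k).drop start)) =
        (let b := (PySem.List.enumerate t (k : Int)).foldl (pvStepB s) (P, d, (start : Int))
         (b.1, b.2.1, s.drop b.2.2.toNat)) ∧
        (let b := (PySem.List.enumerate t (k : Int)).foldl (pvStepB s) (P, d, (start : Int))
         b.2.2.toNat ≤ s.length ∧ 0 ≤ b.2.2) := by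
  intro t
  induction t with
  | nil =>
    intro k start P d ht hsk hk
    have hk' : s.length ≤ k := by
      by_contra hlt
      push_neg at hlt
      rw [List.drop_eq_getElem_cons hlt] at ht
      exact List.cons_ne_nil _ _ ht.symm
    have hkl : k = s.length := by omega
    subst hkl
    simp only [List.foldl_nil, PySem.List.enumerate_nil, List.take_length, Int.toNat_natCast]
    exact ⟨by trivial, by omega, by omega⟩
  | cons c t' ih =>
    intro k start P d ht hsk hk
    have hklt : k < s.length := by
      by_contra hge
      push_neg at hge
      rw [List.drop_eq_nil_of_le hge] at ht
      exact List.cons_ne_nil c t' ht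
    rw [List.drop_eq_getElem_cons hklt] at ht
    injection ht with hc ht'
    simp only [List.foldl_cons, PySem.List.enumerate_cons]
    by_cases hcm : c = ',' ∧ d = 0
    · have hstep : pvStepA (P, d, (s.take k).drop start) c
          = (P ++ [PySem.Chars.strip ((s.take k).drop start)], d, ([] : List Char)) := by
        simp [pvStepA, hcm.1, hcm.2]
      have hstepB : pvStepB s (P, d, (start : Int)) ((k : Int), c)
          = (P ++ [PySem.Chars.strip ((s.take k).drop start)], d, (k : Int) + 1) := by
        simp only [pvStepB]
        rw [if_pos (by exact ⟨hcm.1, hcm.2⟩)]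
        rw [PySem.List.slice_natCast, ← List.drop_take]
      rw [hstep, hstepB]
      have hcast : ((k : Int) + 1) = ((k + 1 : Nat) : Int) := by push_cast; ring
      have hnil : ([] : List Char) = (s.take (k + 1)).drop (k + 1) := by
        rw [List.drop_eq_nil_of_le (by simp [List.length_take])]
      rw [hcast, hnil]
      exact ih (k + 1) (k + 1) _ d ht' le_rfl (by omega)
    · have hcur : (s.take k).drop start ++ [c] = (s.take (k + 1)).drop start := by
        rw [List.take_succ_eq_append_getElem hklt,
          List.drop_append_of_le_length (by simp [List.length_take]; omega), hc]
      have hstep : pvStepA (P, d, (s.take k).drop start) c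
          = (P, (if c = '(' then d + 1 else if c = ')' then d - 1 else d),
             (s.take (k + 1)).drop start) := by
        simp only [pvStepA]
        rw [if_neg hcm, ← hcur]
      have hstepB : pvStepB s (P, d, (start : Int)) ((k : Int), c)
          = (P, (if c = '(' then d + 1 else if c = ')' then d - 1 else d), (start : Int)) := by
        simp only [pvStepB]
        rw [if_neg hcm]
        split_ifs <;> rfl
      rw [hstep, hstepB]
      exact ih (k + 1) start P _ ht' (by omega) (by omega)

-- the reversed fold that nests IFs equals pieces ++ '0' ++ closing parens
theorem pvBuild_rel (pairs : List (List Char × List Char)) :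
    pairs.reverse.foldl
      (fun r p => "IF(".toList ++ p.1 ++ [','] ++ p.2 ++ [','] ++ r ++ [')']) ['0'] =
    (pairs.map (fun p => "IF(".toList ++ p.1 ++ [','] ++ p.2 ++ [','])).flatten ++ ['0'] ++
      List.replicate pairs.length ')' := by
  induction pairs with
  | nil => rfl
  | cons p ps ih =>
    simp only [List.reverse_cons, List.foldl_append, List.foldl_cons, List.foldl_nil, ih,
      List.map_cons, List.flatten_cons, List.length_cons, List.replicate_succ']
    simp [List.append_assoc]

theorem pvPieces_eq (parts : List (List Char)) :
    ((PySem.List.pyRange 0 ((parts.length : Int) - 1) 2).map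
      (fun i => (PySem.List.pyGetD parts i [], PySem.List.pyGetD parts (i + 1) []))).reverse.foldl
      (fun r p => "IF(".toList ++ p.1 ++ [','] ++ p.2 ++ [','] ++ r ++ [')']) ['0'] =
    ((PySem.List.pyRange 0 ((parts.length : Int) - 1) 2).map
      (fun k => "IF(".toList ++ PySem.List.pyGetD parts k [] ++ [','] ++
        PySem.List.pyGetD parts (k + 1) [] ++ [','])).flatten ++ ['0'] ++
      List.replicate ((PySem.List.pyRange 0 ((parts.length : Int) - 1) 2).map
        (fun k => "IF(".toList ++ PySem.List.pyGetD parts k [] ++ [','] ++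
          PySem.List.pyGetD parts (k + 1) [] ++ [','])).length ')' := by
  rw [pvBuild_rel]
  simp only [List.map_map, List.length_map]
  rfl

theorem pvNestedIf_eq (s : List Char) : pvNestedIfA s = pvNestedIfB s := by
  obtain ⟨heq, hle, hnn⟩ := pvSplit_rel s s 0 0 [] 0 (by simp) le_rfl (Nat.zero_le _)
  simp only [Nat.cast_zero, List.take_zero, List.drop_nil] at heq hle hnn
  simp only [pvNestedIfA, pvNestedIfB]
  rw [heq]
  dsimp only
  set w := List.foldl (pvStepB s) ([], 0, 0) (PySem.List.enumerate s 0) with hw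
  have hparts : (if List.drop w.2.2.toNat s ≠ [] then
        w.1 ++ [PySem.Chars.strip (List.drop w.2.2.toNat s)] else w.1)
      = (if w.2.2 < (s.length : Int) then
        w.1 ++ [PySem.Chars.strip (PySem.List.slice s (some w.2.2) none)] else w.1) := by
    simp only [PySem.List.slice_from s hnn]
    by_cases hcc : w.2.2 < (s.length : Int)
    · rw [if_pos hcc, if_pos (by
        intro hnil
        rw [List.drop_eq_nil_iff] at hnil
        omega)]
    · rw [if_neg hcc, if_neg (by
        simp only [ne_eq, not_not]
        rw [List.drop_eq_nil_iff]
        omega)]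
  rw [hparts]
  exact if_congr Iff.rfl rfl (pvPieces_eq _)

theorem pvFindCloseAAux_ge (f : List Char) :
    ∀ (fuel j : Nat) (d : Int), j ≤ pvFindCloseAAux f fuel j d := by
  intro fuel
  induction fuel with
  | zero => intro j d; exact le_rfl
  | succ g ih =>
    intro j d
    simp only [pvFindCloseAAux]
    by_cases hc : j < f.length ∧ 0 < d
    · rw [dif_pos hc]
      have := ih (j + 1) (if f[j]'hc.1 = '(' then d + 1 else if f[j]'hc.1 = ')' then d - 1 else d)
      omega
    · rw [dif_neg hc]

theorem pvFindCloseA_ge (f : List Char) (j : Nat) (d : Int) : j ≤ pvFindCloseA f j d :=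
  pvFindCloseAAux_ge f _ j d

theorem pvCloseBAux_ge (f : List Char) :
    ∀ (fuel j : Nat) (d : Int), j ≤ pvCloseBAux f fuel j d := by
  intro fuel
  induction fuel with
  | zero => intro j d; exact le_rfl
  | succ g ih =>
    intro j d
    simp only [pvCloseBAux]
    by_cases hc : j < f.length ∧ d ≠ 0
    · rw [dif_pos hc]
      have := ih (j + 1)
        (d + (if f[j]'hc.1 = '(' then (1 : Int) else 0) - (if f[j]'hc.1 = ')' then 1 else 0))
      omega
    · rw [dif_neg hc]

theorem pvCloseB_ge (f : List Char) (j : Nat) (d : Int) : j ≤ pvCloseB f j d :=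
  pvCloseBAux_ge f _ j d

theorem pvScanAAux_congr (f : List Char) :
    ∀ (f1 f2 i : Nat), f.length - i ≤ f1 → f.length - i ≤ f2 →
      pvScanAAux f f1 i = pvScanAAux f f2 i := by
  intro f1
  induction f1 with
  | zero =>
    intro f2 i h1 h2
    cases f2 with
    | zero => rfl
    | succ g => simp only [pvScanAAux]; rw [dif_neg (by omega)]
  | succ g ih =>
    intro f2 i h1 h2
    cases f2 with
    | zero => simp only [pvScanAAux]; rw [dif_neg (by omega)]
    | succ g2 =>
      simp only [pvScanAAux]
      by_cases hi : i < f.length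
      · rw [dif_pos hi, dif_pos hi]
        have hge := pvFindCloseA_ge f (i + 4) 1
        by_cases hs : PySem.List.slice f (some (i : Int)) (some ((i : Int) + 4)) = "IFS(".toList
        · rw [if_pos hs, if_pos hs]
          congr 1
          exact ih g2 (pvFindCloseA f (i + 4) 1) (by omega) (by omega)
        · rw [if_neg hs, if_neg hs]
          congr 1
          exact ih g2 (i + 1) (by omega) (by omega)
      · rw [dif_neg hi, dif_neg hi]

theorem pvScanA_unfold (f : List Char) (i : Nat) :
    pvScanA f i = if h : i < f.length then
      (if PySem.List.slice f (some (i : Int)) (some ((i : Int) + 4)) = "IFS(".toList then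
        pvNestedIfA (PySem.List.slice f (some ((i : Int) + 4))
            (some (((pvFindCloseA f (i + 4) 1 : Nat) : Int) - 1))) ::
          pvScanA f (pvFindCloseA f (i + 4) 1)
      else [f[i]] :: pvScanA f (i + 1))
    else [] := by
  unfold pvScanA
  by_cases hi : i < f.length
  · rw [show f.length - i = (f.length - (i + 1)) + 1 from by omega]
    simp only [pvScanAAux]
    rw [dif_pos hi, dif_pos hi]
    have hge := pvFindCloseA_ge f (i + 4) 1
    by_cases hs : PySem.List.slice f (some (i : Int)) (some ((i : Int) + 4)) = "IFS(".toList
    · rw [if_pos hs, if_pos hs]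
      congr 1
      exact pvScanAAux_congr f _ _ _ (by omega) (by omega)
    · rw [if_neg hs, if_neg hs]
  · rw [dif_neg hi]
    cases hfi : f.length - i with
    | zero => rfl
    | succ g => simp only [pvScanAAux]; rw [dif_neg hi]

theorem pvScanBAux_congr :
    ∀ (f1 f2 : Nat) (r : List Char), r.length ≤ f1 → r.length ≤ f2 →
      pvScanBAux f1 r = pvScanBAux f2 r := by
  intro f1
  induction f1 with
  | zero =>
    intro f2 r h1 h2
    have hr : r = [] := List.eq_nil_of_length_eq_zero (by omega)
    subst hr
    cases f2 with
    | zero => rfl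
    | succ g =>
      simp only [pvScanBAux]
      rw [if_pos (by decide)]
  | succ g ih =>
    intro f2 r h1 h2
    cases f2 with
    | zero =>
      have hr : r = [] := List.eq_nil_of_length_eq_zero (by omega)
      subst hr
      simp only [pvScanBAux]
      rw [if_pos (by decide)]
    | succ g2 =>
      simp only [pvScanBAux]
      by_cases hk : PySem.Chars.find r "IFS(".toList = -1
      · rw [if_pos hk, if_pos hk]
      · rw [if_neg hk, if_neg hk]
        have hge := pvCloseB_ge r ((PySem.Chars.find r "IFS(".toList).toNat + 4) 1
        congr 1
        exact ih g2 _ (by simp only [List.length_drop]; omega)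
          (by simp only [List.length_drop]; omega)

theorem pvScanB_unfold (r : List Char) :
    pvScanB r = (if PySem.Chars.find r "IFS(".toList = -1 then r
      else
        r.take (PySem.Chars.find r "IFS(".toList).toNat ++
          pvNestedIfB (PySem.List.slice r
            (some (((PySem.Chars.find r "IFS(".toList).toNat : Int) + 4))
            (some ((((pvCloseB r ((PySem.Chars.find r "IFS(".toList).toNat + 4) 1 : Nat)) : Int) - 1))) ++
          pvScanB (r.drop (pvCloseB r ((PySem.Chars.find r "IFS(".toList).toNat + 4) 1))) := by
  unfold pvScanB
  by_cases hk : PySem.Chars.find r "IFS(".toList = -1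
  · rw [if_pos hk]
    cases hl : r.length with
    | zero => rfl
    | succ g => simp only [pvScanBAux]; rw [if_pos hk]
  · rw [if_neg hk]
    have hr : r ≠ [] := by
      intro hnil
      subst hnil
      exact hk (by decide)
    rw [show r.length = (r.length - 1) + 1 from by
      have : 0 < r.length := List.length_pos_of_ne_nil hr
      omega]
    simp only [pvScanBAux]
    rw [if_neg hk]
    congr 1
    have hge := pvCloseB_ge r ((PySem.Chars.find r "IFS(".toList).toNat + 4) 1
    exact pvScanBAux_congr _ _ _ (by simp only [List.length_drop]; omega)
      (by simp only [List.length_drop]; omega)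

theorem pvCloseAux_eq (f : List Char) :
    ∀ (fuel j : Nat) (d : Int), 0 ≤ d → pvCloseBAux f fuel j d = pvFindCloseAAux f fuel j d := by
  intro fuel
  induction fuel with
  | zero => intro j d _; rfl
  | succ g ih =>
    intro j d hd
    simp only [pvCloseBAux, pvFindCloseAAux]
    by_cases hj : j < f.length
    · by_cases hd0 : d = 0
      · rw [dif_neg (by omega), dif_neg (by omega)]
      · rw [dif_pos ⟨hj, hd0⟩, dif_pos ⟨hj, by omega⟩]
        have harith : (d + (if f[j]'hj = '(' then (1 : Int) else 0)
            - (if f[j]'hj = ')' then (1 : Int) else 0))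
            = (if f[j]'hj = '(' then d + 1 else if f[j]'hj = ')' then d - 1 else d) := by
          split_ifs <;> simp_all
        rw [harith]
        exact ih (j + 1) _ (by split_ifs <;> omega)
    · rw [dif_neg (by omega), dif_neg (by omega)]

theorem pvClose_eq (f : List Char) (j : Nat) (d : Int) (hd : 0 ≤ d) :
    pvCloseB f j d = pvFindCloseA f j d :=
  pvCloseAux_eq f (f.length - j) j d hd

theorem pvFindCloseAAux_drop (f : List Char) (i : Nat) :
    ∀ (fuel j : Nat) (d : Int),
      pvFindCloseAAux f fuel (i + j) d = i + pvFindCloseAAux (f.drop i) fuel j d := by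
  intro fuel
  induction fuel with
  | zero => intro j d; rfl
  | succ g ih =>
    intro j d
    simp only [pvFindCloseAAux]
    have hl : (f.drop i).length = f.length - i := List.length_drop ..
    by_cases hc : j < (f.drop i).length ∧ 0 < d
    · have hj : i + j < f.length := by omega
      rw [dif_pos ⟨hj, hc.2⟩, dif_pos hc]
      have hg : f[i + j]'hj = (f.drop i)[j]'hc.1 := by
        simp [List.getElem_drop]
      rw [hg]
      have := ih (j + 1) (if (f.drop i)[j]'hc.1 = '(' then d + 1
        else if (f.drop i)[j]'hc.1 = ')' then d - 1 else d)
      simpa using this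
    · rw [dif_neg (by omega), dif_neg (by omega)]

theorem pvFindCloseA_drop (f : List Char) (i : Nat) :
    ∀ (j : Nat) (d : Int), pvFindCloseA f (i + j) d = i + pvFindCloseA (f.drop i) j d := by
  intro j d
  unfold pvFindCloseA
  rw [show f.length - (i + j) = (f.drop i).length - j from by
    simp only [List.length_drop]; omega]
  exact pvFindCloseAAux_drop f i _ j d

theorem pvScanA_noifs (f : List Char) (i : Nat)
    (h : ¬ ("IFS(".toList <:+: f.drop i)) : (pvScanA f i).flatten = f.drop i := by
  have H : ∀ (n i : Nat), f.length - i ≤ n → ¬ ("IFS(".toList <:+: f.drop i) →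
      (pvScanA f i).flatten = f.drop i := by
    intro n
    induction n with
    | zero =>
      intro i hn _
      rw [pvScanA_unfold, dif_neg (by omega)]
      rw [List.drop_eq_nil_of_le (by omega)]
      rfl
    | succ n ih =>
      intro i hn hno
      rw [pvScanA_unfold]
      by_cases hi : i < f.length
      · rw [dif_pos hi]
        have hslice : PySem.List.slice f (some (i : Int)) (some ((i : Int) + 4))
            = (f.drop i).take 4 := by
          have : ((i : Int) + 4) = ((i + 4 : Nat) : Int) := by push_cast; ring
          rw [this, PySem.List.slice_natCast]
          congr 1
          omega
        have hne : ¬ (PySem.List.slice f (some (i : Int)) (some ((i : Int) + 4))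
            = "IFS(".toList) := by
          intro he
          rw [hslice] at he
          exact hno (List.IsPrefix.isInfix (he ▸ List.take_prefix 4 (f.drop i)))
        rw [if_neg hne]
        have hcons : f.drop i = f[i] :: f.drop (i + 1) := List.drop_eq_getElem_cons hi
        have hno' : ¬ ("IFS(".toList <:+: f.drop (i + 1)) := by
          intro hinf
          exact hno (hinf.trans (List.IsSuffix.isInfix ⟨[f[i]], hcons.symm⟩))
        rw [List.flatten_cons, ih (i + 1) (by omega) hno', hcons]
        rfl
      · rw [dif_neg hi]
        rw [List.drop_eq_nil_of_le (by omega)]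
        rfl
  exact H (f.length - i) i le_rfl h

theorem pvScanA_copy (f : List Char) (m : Nat) :
    ∀ (i : Nat), (∀ t, t < m → ¬ ("IFS(".toList <+: f.drop (i + t))) → i + m ≤ f.length →
      (pvScanA f i).flatten = (f.drop i).take m ++ (pvScanA f (i + m)).flatten := by
  induction m with
  | zero => intro i _ _; simp
  | succ m ih =>
    intro i hno hlen
    have hi : i < f.length := by omega
    rw [pvScanA_unfold, dif_pos hi]
    have hslice : PySem.List.slice f (some (i : Int)) (some ((i : Int) + 4))
        = (f.drop i).take 4 := by
      have : ((i : Int) + 4) = ((i + 4 : Nat) : Int) := by push_cast; ring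
      rw [this, PySem.List.slice_natCast]
      congr 1
      omega
    have hne : ¬ (PySem.List.slice f (some (i : Int)) (some ((i : Int) + 4))
        = "IFS(".toList) := by
      intro he
      rw [hslice] at he
      have : "IFS(".toList <+: f.drop i := he ▸ List.take_prefix 4 (f.drop i)
      exact hno 0 (by omega) (by simpa using this)
    rw [if_neg hne, List.flatten_cons]
    have hcons : f.drop i = f[i] :: f.drop (i + 1) := List.drop_eq_getElem_cons hi
    have ih' := ih (i + 1) (fun t ht => by
        have := hno (t + 1) (by omega)
        simpa [Nat.add_assoc, Nat.add_comm 1 t] using this)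
      (by omega)
    rw [ih', hcons]
    simp only [List.take_succ_cons]
    have : i + 1 + m = i + (m + 1) := by omega
    rw [this]
    rfl

theorem pvScan_eq (f : List Char) (i : Nat) :
    (pvScanA f i).flatten = pvScanB (f.drop i) := by
  have H : ∀ (n i : Nat), f.length - i ≤ n → (pvScanA f i).flatten = pvScanB (f.drop i) := by
    intro n
    induction n with
    | zero =>
      intro i hn
      have hd : f.drop i = [] := List.drop_eq_nil_of_le (by omega)
      rw [pvScanA_unfold, dif_neg (by omega), hd, pvScanB_unfold]
      rw [if_pos (by
        rw [PySem.Chars.find_eq_neg_one_iff]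
        intro hinf
        have := hinf.length_le
        simp at this)]
      rfl
    | succ n ih =>
      intro i hn
      rw [pvScanB_unfold]
      by_cases hneg : PySem.Chars.find (f.drop i) "IFS(".toList = -1
      · rw [if_pos hneg]
        exact pvScanA_noifs f i ((PySem.Chars.find_eq_neg_one_iff _ _).mp hneg)
      · rw [if_neg hneg]
        try dsimp only
        have h0 : 0 ≤ PySem.Chars.find (f.drop i) "IFS(".toList := by
          have := PySem.Chars.neg_one_le_find (f.drop i) "IFS(".toList
          omega
        set kn := (PySem.Chars.find (f.drop i) "IFS(".toList).toNat with hkn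
        obtain ⟨hpre, hmin⟩ := PySem.Chars.find_spec h0
        rw [← hkn] at hpre hmin
        have hdd : (f.drop i).drop kn = f.drop (i + kn) := by rw [List.drop_drop]
        have h4 : ("IFS(".toList).length = 4 := rfl
        have hlen4 : i + kn + 4 ≤ f.length := by
          have h1 := hpre.length_le
          rw [hdd, h4] at h1
          simp only [List.length_drop] at h1
          omega
        have hcopy := pvScanA_copy f kn i (fun t ht => by
            have hm := hmin t ht
            rw [List.drop_drop] at hm
            exact hm) (by omega)
        rw [hcopy]
        rw [pvScanA_unfold, dif_pos (show i + kn < f.length by omega)]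
        have hslice : PySem.List.slice f (some ((i + kn : Nat) : Int))
            (some (((i + kn : Nat) : Int) + 4)) = "IFS(".toList := by
          have hc : (((i + kn : Nat) : Int) + 4) = ((i + kn + 4 : Nat) : Int) := by
            push_cast; ring
          rw [hc, PySem.List.slice_natCast]
          rw [show i + kn + 4 - (i + kn) = 4 from by omega, ← hdd]
          symm
          rw [List.prefix_iff_eq_take] at hpre
          exact hpre
        rw [if_pos hslice]
        have hgeJ : kn + 4 ≤ pvFindCloseA (f.drop i) (kn + 4) 1 := pvFindCloseA_ge _ _ _
        have hj' : pvCloseB (f.drop i) (kn + 4) 1 = pvFindCloseA (f.drop i) (kn + 4) 1 :=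
          pvClose_eq _ _ _ (by omega)
        have hj : pvFindCloseA f (i + kn + 4) 1
            = i + pvFindCloseA (f.drop i) (kn + 4) 1 := by
          have h5 := pvFindCloseA_drop f i (kn + 4) 1
          rw [show i + (kn + 4) = i + kn + 4 from by omega] at h5
          exact h5
        rw [List.flatten_cons, pvNestedIf_eq, hj, hj']
        set J := pvFindCloseA (f.drop i) (kn + 4) 1 with hJ
        have hsl : PySem.List.slice f (some (((i + kn : Nat) : Int) + 4))
            (some (((i + J : Nat) : Int) - 1))
            = PySem.List.slice (f.drop i) (some ((kn : Int) + 4))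
              (some ((J : Int) - 1)) := by
          rw [show (((i + kn : Nat) : Int) + 4) = ((i + kn + 4 : Nat) : Int) from by
              push_cast; ring,
            show (((i + J : Nat) : Int) - 1) = ((i + J - 1 : Nat) : Int) from by omega,
            show ((kn : Int) + 4) = ((kn + 4 : Nat) : Int) from by push_cast; ring,
            show ((J : Int) - 1) = ((J - 1 : Nat) : Int) from by omega,
            PySem.List.slice_natCast, PySem.List.slice_natCast, List.drop_drop]
          rw [show i + (kn + 4) = i + kn + 4 from by omega,
            show i + J - 1 - (i + kn + 4) = J - 1 - (kn + 4) from by omega]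
        rw [hsl]
        have htail : (pvScanA f (i + J)).flatten = pvScanB ((f.drop i).drop J) := by
          rw [List.drop_drop]
          exact ih (i + J) (by omega)
        rw [htail]
        try rfl
        try simp only [List.append_assoc]
  exact H (f.length - i) i le_rfl

theorem pvJoin_nil_flatten (l : List (List Char)) : PySem.Chars.join [] l = l.flatten := by
  induction l with
  | nil => simp [PySem.Chars.join_nil]
  | cons p rest ih =>
    cases rest with
    | nil => simp [PySem.Chars.join, List.intercalate]
    | cons q rest' =>
      rw [PySem.Chars.join_cons_cons] at *
      simp [← ih]

-- ===== VERDICT (by name: the statement is the Claim_ definition above) =====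
theorem fix_formula_spec : Claim_equal_fix_formula := by
  intro f _
  unfold Spec_fix_formula fix_formula fix_formula_alt
  split
  · rfl
  · split
    · rfl
    · have := pvScan_eq (PySem.Chars.replace f.toList "IFNA(".toList "IFERROR(".toList) 0
      simp only [List.drop_zero] at this
      rw [pvJoin_nil_flatten, this]
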